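-- pv_equiv track=rewrite | github.com/Usercyk/CS201 | code/openjudge/granpa_is_famous_02092.py | get_2nd_player
-- ===== SOURCE A (Python) =====
-- from typing import List
-- from collections import defaultdict
--
-- def get_2nd_player(players: List[int]) -> List[int]:
--     """
--     Get the second players
--
--     Arguments:
--         players -- all ranked players
--
--     Returns:
--         The number of the second player
--     """
--     rank = defaultdict(int)
--     for player in players:
--         rank[player] += 1
--     invert = defaultdict(list)
--     for k, v in rank.items():
--         invert[v].append(k)
--
--     second_time = sorted(invert.keys())[-2]
--     return sorted(invert[second_time])
-- ===== SOURCE B (Python) =====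
-- def get_2nd_player(players):
--     """
--     Get the second players
--
--     Arguments:
--         players -- all ranked players
--
--     Returns:
--         The number of the second player
--     """
--     s = sorted(players)
--     runs = []
--     i = 0
--     n = len(s)
--     while i < n:
--         j = i + 1
--         while j < n and s[j] == s[i]:
--             j += 1
--         runs.append((s[i], j - i))
--         i = j
--     second_time = sorted({c for _, c in runs})[-2]
--     return [v for v, c in runs if c == second_time]
-- ===== Notes on version B (the rewrite author's own statement) =====
-- stated objective: alternative
-- what changed: A counts occurrences in a hash Counter and builds an inverse count->players dict; B sorts a copy of the list once and walks it grouping consecutive equal values into runs, then picks the second-highest distinct run length and filters the (already sorted) run values.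
import Mathlib
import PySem

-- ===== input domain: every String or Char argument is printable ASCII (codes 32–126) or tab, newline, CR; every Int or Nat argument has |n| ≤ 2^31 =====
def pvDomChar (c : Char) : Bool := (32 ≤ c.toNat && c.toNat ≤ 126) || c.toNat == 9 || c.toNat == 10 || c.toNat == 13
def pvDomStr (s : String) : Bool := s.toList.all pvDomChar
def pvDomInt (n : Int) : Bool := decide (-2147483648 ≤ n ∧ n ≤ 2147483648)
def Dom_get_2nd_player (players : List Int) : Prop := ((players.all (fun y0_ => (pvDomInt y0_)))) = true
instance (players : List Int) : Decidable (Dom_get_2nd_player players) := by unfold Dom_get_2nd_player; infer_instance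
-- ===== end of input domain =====

-- B replaces A's hash counting (Counter dict + inverse-index dict) by sorting a copy once and
-- grouping consecutive equal values into runs (alternative decomposition; same return value).

-- ===== PORT A =====
def get_2nd_player (players : List Int) : List Int :=
  let rank : PySem.Dict Int Int :=
    players.foldl (fun d player => d.modify player 0 (· + 1)) PySem.Dict.empty
  let invert : PySem.Dict Int (List Int) :=
    rank.items.foldl (fun d kv => d.modify kv.2 [] (· ++ [kv.1])) PySem.Dict.empty
  match PySem.List.pyGet? (PySem.List.sorted invert.keys (fun x => x) false) (-2) with
  | some second_time => PySem.List.sorted (invert.getD second_time []) (fun x => x) false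
  | none => []  -- sorted(invert.keys())[-2] raises IndexError in Python: excluded by Pre_

-- ===== PORT B =====
-- inner while loop of Source B: how many further copies of p open the list
def pvRunLen (p : Int) : List Int → Nat
  | [] => 0
  | q :: rest => if q == p then pvRunLen p rest + 1 else 0

-- outer while loop of Source B: run-length encode the (sorted) list
def pvRuns : List Int → List (Int × Int)
  | [] => []
  | p :: rest =>
      let k := pvRunLen p rest
      (p, ((k + 1 : Nat) : Int)) :: pvRuns (rest.drop k)
termination_by l => l.length
decreasing_by simp

def get_2nd_player_alt (players : List Int) : List Int :=
  let runs := pvRuns (PySem.List.sorted players (fun x => x) false)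
  match PySem.List.pyGet? (PySem.List.sorted (PySem.Set.ofList (runs.map (·.2))) (fun x => x) false) (-2) with
  | some second_time => (runs.filter (fun vc => vc.2 == second_time)).map (·.1)
  | none => []  -- sorted({c for _, c in runs})[-2] raises IndexError in Python: excluded by Pre_

-- ===== PRECONDITION & SPEC =====
-- Pre_ excludes exactly the inputs with fewer than two distinct occurrence counts (including the
-- empty list), on which BOTH the Python A and the Python B raise IndexError.
def Pre_get_2nd_player (players : List Int) : Prop :=
  2 ≤ (PySem.Set.ofList ((PySem.List.dedup players).map (fun v => (players.count v : Int)))).length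
instance (players : List Int) : Decidable (Pre_get_2nd_player players) := by unfold Pre_get_2nd_player; infer_instance
def pvWitness_get_2nd_player : List Int := [1, 2, 2]

def Spec_get_2nd_player (players : List Int) (out : List Int) : Prop := out = get_2nd_player_alt players
instance (players : List Int) (out : List Int) : Decidable (Spec_get_2nd_player players out) := by unfold Spec_get_2nd_player; infer_instance

-- ===== CLAIM (what is proved, stated in full; the proofs are below) =====
def Claim_equal_get_2nd_player : Prop := ∀ (players : List Int), Dom_get_2nd_player players → Pre_get_2nd_player players → Spec_get_2nd_player players (get_2nd_player players)

-- ===== LEMMAS AND PROOFS =====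

-- the inner while loop counts the length of the leading run
theorem pvRunLen_eq (p : Int) (l : List Int) :
    pvRunLen p l = (l.takeWhile (· == p)).length := by
  induction l with
  | nil => rfl
  | cons q rest ih => by_cases h : q = p <;> simp [pvRunLen, h, ih]

theorem drop_takeWhile_len (l : List Int) (f : Int → Bool) :
    l.drop (l.takeWhile f).length = l.dropWhile f := by
  induction l with
  | nil => rfl
  | cons a t ih => by_cases h : f a <;> simp [h, ih]

-- run-length encoding of a sorted list = its distinct values in increasing order, each with its count
theorem pvRuns_sorted_eq : ∀ (n : Nat) (s : List Int), s.length ≤ n → s.Pairwise (· ≤ ·) →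
    pvRuns s = (PySem.List.sorted (PySem.Set.ofList s) (fun x => x) false).map
      (fun v => (v, (s.count v : Int))) := by
  intro n
  induction n with
  | zero =>
    intro s h _
    have hnil : s = [] := List.eq_nil_of_length_eq_zero (Nat.le_zero.mp h)
    subst hnil; simp [pvRuns]; rfl
  | succ n ih =>
    intro s hlen hs
    match s with
    | [] => simp [pvRuns]; rfl
    | p :: rest =>
      have hrest : rest.Pairwise (· ≤ ·) := (List.pairwise_cons.mp hs).2
      have hple : ∀ x ∈ rest, p ≤ x := (List.pairwise_cons.mp hs).1
      have hwt : rest.takeWhile (· == p) ++ rest.dropWhile (· == p) = rest :=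
        List.takeWhile_append_dropWhile
      have hk : pvRunLen p rest = (rest.takeWhile (· == p)).length := pvRunLen_eq p rest
      have hdrop : rest.drop (pvRunLen p rest) = rest.dropWhile (· == p) := by
        rw [hk]; exact drop_takeWhile_len rest _
      have ht_sorted : (rest.dropWhile (· == p)).Pairwise (· ≤ ·) :=
        List.Pairwise.sublist (List.dropWhile_sublist _) hrest
      have hw_all : ∀ x ∈ rest.takeWhile (· == p), x = p := by
        intro x hx; simpa using List.mem_takeWhile_imp hx
      have hpnt : p ∉ rest.dropWhile (· == p) := by
        intro hx
        cases ht : rest.dropWhile (· == p) with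
        | nil => rw [ht] at hx; simp at hx
        | cons h0 tt =>
          have hne : h0 ≠ p := by
            have := List.head_dropWhile_not (· == p) (l := rest) (by rw [ht]; simp)
            simp only [ht, List.head_cons] at this; simpa using this
          have hh0 : p ≤ h0 := hple h0 ((List.dropWhile_sublist _).subset (by rw [ht]; simp))
          rw [ht] at hx
          rcases List.mem_cons.mp hx with h | h
          · exact hne h.symm
          · have hle : h0 ≤ p := by
              have := ht ▸ ht_sorted
              exact (List.pairwise_cons.mp this).1 p h
            exact hne (le_antisymm hle hh0)
      have hpt : ∀ x ∈ rest.dropWhile (· == p), p < x := by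
        intro x hx
        have h1 : p ≤ x := hple x ((List.dropWhile_sublist _).subset hx)
        refine lt_of_le_of_ne h1 (fun h => ?_)
        exact hpnt (h ▸ hx)
      have hcw : (rest.takeWhile (· == p)).count p = (rest.takeWhile (· == p)).length :=
        List.count_eq_length.mpr (fun b hb => (hw_all b hb).symm)
      have hct : (rest.dropWhile (· == p)).count p = 0 := List.count_eq_zero.mpr hpnt
      have hcrest : rest.count p = (rest.takeWhile (· == p)).length := by
        conv_lhs => rw [← hwt]
        rw [List.count_append, hcw, hct]
        omega
      have hcount_p : (p :: rest).count p = (rest.takeWhile (· == p)).length + 1 := by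
        rw [List.count_cons_self, hcrest]
      have hsorted_split : PySem.List.sorted (PySem.Set.ofList (p :: rest)) (fun x => x) false
          = p :: PySem.List.sorted (PySem.Set.ofList (rest.dropWhile (· == p))) (fun x => x) false := by
        apply PySem.List.sorted_eq_of_perm_of_pairwise_lt
        · apply (List.perm_ext_iff_of_nodup ?_ ?_).mpr
          · intro a
            simp only [List.mem_cons, PySem.List.mem_sorted, PySem.Set.mem_ofList]
            constructor
            · rintro (h | h)
              · exact Or.inl h
              · exact Or.inr ((List.dropWhile_sublist _).subset h)
            · rintro (h | h)
              · exact Or.inl h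
              · rw [← hwt] at h
                rcases List.mem_append.mp h with h | h
                · exact Or.inl (hw_all a h)
                · exact Or.inr h
          · apply List.nodup_cons.mpr
            constructor
            · simpa [PySem.List.mem_sorted, PySem.Set.mem_ofList] using hpnt
            · exact ((PySem.List.sorted_perm _ _ _).nodup_iff).mpr (PySem.Set.nodup_ofList _)
          · exact PySem.Set.nodup_ofList _
        · apply List.pairwise_cons.mpr
          refine ⟨fun y hy => hpt y ?_, PySem.List.sorted_ofList_pairwise_lt _⟩
          simpa [PySem.List.mem_sorted, PySem.Set.mem_ofList] using hy
      have hlt : (rest.dropWhile (· == p)).length ≤ n := by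
        have := (List.dropWhile_sublist (· == p) (l := rest)).length_le
        simp at hlen; omega
      rw [pvRuns, hdrop, hsorted_split, ih _ hlt ht_sorted]
      simp only [List.map_cons, hk]
      congr 1
      · rw [hcount_p]
      · apply List.map_congr_left
        intro v hv
        have hvt : v ∈ rest.dropWhile (· == p) := by
          simpa [PySem.List.mem_sorted, PySem.Set.mem_ofList] using hv
        have hvp : v ≠ p := fun h => absurd (hpt v hvt) (by rw [h]; exact lt_irrefl p)
        have hvw : v ∉ rest.takeWhile (· == p) := fun h => hvp (hw_all v h)
        have hcv : (p :: rest).count v = (rest.dropWhile (· == p)).count v := by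
          rw [List.count_cons_of_ne hvp.symm]
          conv_lhs => rw [← hwt]
          rw [List.count_append, List.count_eq_zero.mpr hvw]
          omega
        rw [hcv]

-- A's second loop: keys of the inverse-index dict = the distinct count values
theorem keysI (l : List (Int × Int)) :
    (List.foldl (fun d kv => d.modify kv.2 [] fun x => x ++ [kv.1]) PySem.Dict.empty l).keys
    = PySem.Set.ofList (l.map (·.2)) := by
  rw [PySem.Dict.keys_foldl_modify_key l (fun kv => kv.2) [] (fun _ kv acc => acc ++ [kv.1])]
  simp [PySem.Set.update, PySem.Set.ofList_eq_foldl]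

-- A's second loop: looking the inverse-index dict up at c gives the keys whose count is c
theorem getDI (l : List (Int × Int)) (c : Int) :
    (List.foldl (fun d kv => d.modify kv.2 [] fun x => x ++ [kv.1]) PySem.Dict.empty l).getD c []
    = ((l.filter (fun kv => kv.2 == c)).map (·.1)) := by
  have h : List.foldl (fun d kv => d.modify kv.2 [] fun x => x ++ [kv.1]) PySem.Dict.empty l
      = List.foldl (fun d p => d.modify p.1 [] fun x => x ++ [p.2]) PySem.Dict.empty
          (l.map (fun kv => (kv.2, kv.1))) := by
    rw [List.foldl_map]
  rw [h, PySem.Dict.getD_foldl_modify_append]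
  simp [List.filter_map, Function.comp_def]

-- A's dict pipeline, evaluated to a normal form
theorem A_eval (players : List Int) : get_2nd_player players =
    match PySem.List.pyGet? (PySem.List.sorted
        (PySem.Set.ofList ((PySem.Set.ofList players).map (fun v => (players.count v : Int))))
        (fun x => x) false) (-2) with
    | some c => PySem.List.sorted
        ((PySem.Set.ofList players).filter (fun v => (players.count v : Int) == c)) (fun x => x) false
    | none => [] := by
  have hrank : players.foldl (fun d player => d.modify player 0 (· + 1)) PySem.Dict.empty
      = PySem.Dict.counter players := (PySem.Dict.counter_eq_foldl players).symm
  simp only [get_2nd_player, hrank, PySem.Dict.items_counter, keysI, getDI,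
    List.map_map, List.filter_map, Function.comp_def, List.map_id']

theorem ofList_perm_of_perm (l1 l2 : List Int) (h : l1.Perm l2) :
    (PySem.Set.ofList l1).Perm (PySem.Set.ofList l2) := by
  apply (List.perm_ext_iff_of_nodup (PySem.Set.nodup_ofList _) (PySem.Set.nodup_ofList _)).mpr
  intro a
  simp only [PySem.Set.mem_ofList]
  exact h.mem_iff

-- B's sort-and-group pipeline, evaluated to the same normal form
theorem B_eval (players : List Int) : get_2nd_player_alt players =
    match PySem.List.pyGet? (PySem.List.sorted
        (PySem.Set.ofList ((PySem.Set.ofList players).map (fun v => (players.count v : Int))))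
        (fun x => x) false) (-2) with
    | some c => PySem.List.sorted
        ((PySem.Set.ofList players).filter (fun v => (players.count v : Int) == c)) (fun x => x) false
    | none => [] := by
  have hsp : (PySem.List.sorted players (fun x => x) false).Perm players :=
    PySem.List.sorted_perm players (fun x => x) false
  have hcount : ∀ v : Int, (PySem.List.sorted players (fun x => x) false).count v = players.count v :=
    fun v => hsp.count_eq v
  have hruns : pvRuns (PySem.List.sorted players (fun x => x) false)
      = (PySem.List.sorted (PySem.Set.ofList players) (fun x => x) false).map
          (fun v => (v, (players.count v : Int))) := by
    rw [pvRuns_sorted_eq (PySem.List.sorted players (fun x => x) false).length _ le_rfl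
        (PySem.List.sorted_pairwise players (fun x => x))]
    have hofl : (PySem.List.sorted (PySem.Set.ofList (PySem.List.sorted players (fun x => x) false)) (fun x => x) false)
        = PySem.List.sorted (PySem.Set.ofList players) (fun x => x) false :=
      (PySem.List.sorted_id_eq_sorted_id_iff_perm _ _).mpr (ofList_perm_of_perm _ _ hsp)
    rw [hofl]
    exact List.map_congr_left (fun v _ => by rw [hcount v])
  have hscut : PySem.List.sorted (PySem.Set.ofList
        (((PySem.List.sorted (PySem.Set.ofList players) (fun x => x) false).map
          (fun v => (v, (players.count v : Int)))).map (·.2))) (fun x => x) false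
      = PySem.List.sorted (PySem.Set.ofList ((PySem.Set.ofList players).map
          (fun v => (players.count v : Int)))) (fun x => x) false := by
    apply (PySem.List.sorted_id_eq_sorted_id_iff_perm _ _).mpr
    apply ofList_perm_of_perm
    rw [List.map_map]
    exact (PySem.List.sorted_perm _ _ _).map _
  have hbranch : ∀ c : Int,
      (((PySem.List.sorted (PySem.Set.ofList players) (fun x => x) false).map
          (fun v => (v, (players.count v : Int)))).filter (fun vc => vc.2 == c)).map (·.1)
      = PySem.List.sorted ((PySem.Set.ofList players).filter
          (fun v => (players.count v : Int) == c)) (fun x => x) false := by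
    intro c
    rw [List.filter_map, List.map_map]
    have h1 : ((PySem.List.sorted (PySem.Set.ofList players) (fun x => x) false).filter
          (fun v => (players.count v : Int) == c)).Perm
        ((PySem.Set.ofList players).filter (fun v => (players.count v : Int) == c)) :=
      (PySem.List.sorted_perm _ _ _).filter _
    have h2 := (PySem.List.sorted_ofList_pairwise_lt players).filter
      (fun v => (players.count v : Int) == c)
    rw [PySem.List.sorted_eq_of_perm_of_pairwise_lt _ _ _ h1 h2]
    simp [Function.comp_def]
  simp only [get_2nd_player_alt, hruns, hscut]
  cases PySem.List.pyGet? (PySem.List.sorted (PySem.Set.ofList ((PySem.Set.ofList players).map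
      (fun v => (players.count v : Int)))) (fun x => x) false) (-2) with
  | none => rfl
  | some c => exact hbranch c

-- ===== VERDICT (by name: the statement is the Claim_ definition above) =====
theorem get_2nd_player_spec : Claim_equal_get_2nd_player := by
  intro players _ _
  unfold Spec_get_2nd_player
  rw [A_eval, B_eval]
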